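-- pv_equiv track=rewrite | github.com/proyect-nexus/alpha-insights | context.py | _classify_hype
-- ===== SOURCE A (Python) =====
-- def _classify_hype(mentions: int, posts: list) -> str:
--     """Clasifica el nivel de hype en Reddit."""
--     if mentions == 0:
--         return "none"
--
--     max_engagement = max((p.get("score", 0) + p.get("num_comments", 0) for p in posts), default=0)
--
--     if mentions >= 15 or max_engagement >= 500:
--         return "viral"
--     if mentions >= 8 or max_engagement >= 100:
--         return "high"
--     if mentions >= 3 or max_engagement >= 20:
--         return "moderate"
--     return "low"
-- ===== SOURCE B (Python) =====
-- LABELS = ["low", "moderate", "high", "viral"]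
--
-- def _classify_hype(mentions: int, posts: list) -> str:
--     if mentions == 0:
--         return "none"
--     max_engagement = max((p.get("score", 0) + p.get("num_comments", 0) for p in posts), default=0)
--     m_idx = sum(mentions >= t for t in (3, 8, 15))
--     e_idx = sum(max_engagement >= t for t in (20, 100, 500))
--     return LABELS[max(m_idx, e_idx)]
-- ===== Notes on version B (the rewrite author's own statement) =====
-- stated objective: simpler
-- what changed: Replaces the three-way OR-cascade by two independent severity indices (threshold counts for mentions and for max engagement) combined with max and used to index a label table.
import Mathlib
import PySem

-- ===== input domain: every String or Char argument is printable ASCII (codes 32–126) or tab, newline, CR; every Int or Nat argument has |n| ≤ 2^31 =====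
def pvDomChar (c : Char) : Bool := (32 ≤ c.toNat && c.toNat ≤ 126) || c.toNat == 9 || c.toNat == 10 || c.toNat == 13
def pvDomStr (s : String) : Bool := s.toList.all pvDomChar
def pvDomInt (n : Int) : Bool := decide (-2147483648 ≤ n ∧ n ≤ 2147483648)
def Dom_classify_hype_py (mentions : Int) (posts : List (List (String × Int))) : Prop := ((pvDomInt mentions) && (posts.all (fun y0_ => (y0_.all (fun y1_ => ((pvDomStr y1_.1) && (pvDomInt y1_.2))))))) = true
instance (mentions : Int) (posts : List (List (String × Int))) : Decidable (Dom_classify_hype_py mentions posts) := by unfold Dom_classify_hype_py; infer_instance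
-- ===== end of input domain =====

-- B replaces A's OR-cascade by two threshold-count severity indices combined with max, indexing a label table (objective: simpler decomposition, same cost).

-- ===== PORT A =====
def classify_hype_py (mentions : Int) (posts : List (List (String × Int))) : String :=
  if mentions == 0 then "none"
  else
    let max_engagement :=
      (PySem.List.max? (posts.map (fun p => PySem.Dict.getD (PySem.Dict.mk p) "score" 0 + PySem.Dict.getD (PySem.Dict.mk p) "num_comments" 0)) (fun x => x)).getD 0
    if mentions ≥ 15 ∨ max_engagement ≥ 500 then "viral"
    else if mentions ≥ 8 ∨ max_engagement ≥ 100 then "high"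
    else if mentions ≥ 3 ∨ max_engagement ≥ 20 then "moderate"
    else "low"

-- ===== PORT B =====
def pvLabels : List String := ["low", "moderate", "high", "viral"]

-- sum(v >= t for t in ts) : count of thresholds passed
def pvIdx (v : Int) (ts : List Int) : Nat := ts.countP (fun t => v ≥ t)

def classify_hype_py_alt (mentions : Int) (posts : List (List (String × Int))) : String :=
  if mentions == 0 then "none"
  else
    let max_engagement :=
      (PySem.List.max? (posts.map (fun p => PySem.Dict.getD (PySem.Dict.mk p) "score" 0 + PySem.Dict.getD (PySem.Dict.mk p) "num_comments" 0)) (fun x => x)).getD 0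
    pvLabels.getD (max (pvIdx mentions [3, 8, 15]) (pvIdx max_engagement [20, 100, 500])) "low"

-- ===== PRECONDITION & SPEC =====
def Spec_classify_hype_py (mentions : Int) (posts : List (List (String × Int))) (out : String) : Prop := out = classify_hype_py_alt mentions posts
instance (mentions : Int) (posts : List (List (String × Int))) (out : String) : Decidable (Spec_classify_hype_py mentions posts out) := by unfold Spec_classify_hype_py; infer_instance

-- ===== CLAIM (what is proved, stated in full; the proofs are below) =====
def Claim_equal_classify_hype_py : Prop := ∀ (mentions : Int) (posts : List (List (String × Int))), Dom_classify_hype_py mentions posts → Spec_classify_hype_py mentions posts (classify_hype_py mentions posts)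

-- ===== LEMMAS AND PROOFS =====
theorem pv_core (m e : Int) :
    (if m ≥ 15 ∨ e ≥ 500 then "viral"
     else if m ≥ 8 ∨ e ≥ 100 then "high"
     else if m ≥ 3 ∨ e ≥ 20 then "moderate"
     else "low")
    = pvLabels.getD (max (pvIdx m [3, 8, 15]) (pvIdx e [20, 100, 500])) "low" := by
  have hm : pvIdx m [3, 8, 15] = (if m ≥ 15 then 3 else if m ≥ 8 then 2 else if m ≥ 3 then 1 else 0) := by
    simp only [pvIdx, List.countP_cons, List.countP_nil, decide_eq_true_eq]
    split_ifs <;> omega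
  have he : pvIdx e [20, 100, 500] = (if e ≥ 500 then 3 else if e ≥ 100 then 2 else if e ≥ 20 then 1 else 0) := by
    simp only [pvIdx, List.countP_cons, List.countP_nil, decide_eq_true_eq]
    split_ifs <;> omega
  rw [hm, he]
  split_ifs <;> first | rfl | omega

-- ===== VERDICT (by name: the statement is the Claim_ definition above) =====
theorem classify_hype_py_spec : Claim_equal_classify_hype_py := by
  intro mentions posts _
  unfold Spec_classify_hype_py classify_hype_py classify_hype_py_alt
  by_cases h : mentions == 0
  · simp [h]
  · simp only [h]
    exact pv_core mentions _
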